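-- pv_equiv track=rewrite | github.com/njodib/EulerProblems | problem77.py | sub_problem
-- ===== SOURCE A (Python) =====
-- def prime_sieve(n):
--     primes = [True] * (n + 1)
--     primes[0] = primes[1] = False
--     for p in range(2, int(n**0.5) + 1):
--         if primes[p]:
--             for i in range(p * p, n + 1, p):
--                 primes[i] = False
--     return [i for i, is_prime in enumerate(primes) if is_prime]
--
-- def sub_problem(target,n):
--     primes = prime_sieve(target)
--     ways = [1] + [0]*target
--     for p in primes:
--         for i in range(p, target+1):
--             ways[i]+= ways[i-p]
--     for x in range(target+1):
--         if(ways[x]>=n):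
--             return x
--     return -1
-- ===== SOURCE B (Python) =====
-- def prime_sieve(n):
--     primes = [True] * (n + 1)
--     primes[0] = primes[1] = False
--     for p in range(2, int(n**0.5) + 1):
--         if primes[p]:
--             for i in range(p * p, n + 1, p):
--                 primes[i] = False
--     return [i for i, is_prime in enumerate(primes) if is_prime]
--
-- def sub_problem(target, n):
--     primes = prime_sieve(target)
--     memo = {}
--
--     def count(k, r):
--         # number of ways to write r as a sum of primes drawn from primes[:k]
--         if r == 0:
--             return 1
--         if k == 0:
--             return 0
--         key = (k, r)
--         if key not in memo:
--             c = count(k - 1, r)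
--             if primes[k - 1] <= r:
--                 c += count(k, r - primes[k - 1])
--             memo[key] = c
--         return memo[key]
--
--     for x in range(target + 1):
--         # warm the memo in increasing (x, k) order so each call recurses shallowly,
--         # then test the fully-constrained count
--         for k in range(len(primes) + 1):
--             count(k, x)
--         if count(len(primes), x) >= n:
--             return x
--     return -1
-- ===== Notes on version B (the rewrite author's own statement) =====
-- stated objective: faster
-- what changed: Replaces A's bottom-up in-place 1D DP array (always filled up to target before the scan) with a top-down memoized recursion count(k, r) on a dict, evaluated while scanning x upward, so work stops at the first x whose prime-partition count reaches n.
import Mathlib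
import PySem

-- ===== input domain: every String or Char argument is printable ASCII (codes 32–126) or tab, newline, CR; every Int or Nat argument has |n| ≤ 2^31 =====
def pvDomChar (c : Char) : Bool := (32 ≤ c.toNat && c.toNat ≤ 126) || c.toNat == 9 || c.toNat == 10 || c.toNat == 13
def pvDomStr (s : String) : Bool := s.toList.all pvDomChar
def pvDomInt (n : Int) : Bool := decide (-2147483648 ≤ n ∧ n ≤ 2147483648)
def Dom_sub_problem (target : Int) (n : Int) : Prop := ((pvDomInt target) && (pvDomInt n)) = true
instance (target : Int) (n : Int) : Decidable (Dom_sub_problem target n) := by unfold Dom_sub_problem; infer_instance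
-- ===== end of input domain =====

-- B replaces A's bottom-up in-place DP array with a top-down memoized recursion
-- count(k, r) over a dict, scanned in increasing x so it stops at the first qualifying x
-- (objective: faster when the answer is small; equivalence of return values is proved below).

-- ===== PORT A =====
-- shared helper prime_sieve (identical in Source A and Source B)
def prime_sieve (n : Nat) : List Nat :=
  let primes := ((Array.replicate (n + 1) true).set! 0 false).set! 1 false
  let primes := (List.range' 2 (Nat.sqrt n + 1 - 2)).foldl
    (fun a p =>
      if a[p]! then
        -- range(p*p, n+1, p) transliterated as range' with count ceil((n+1-p*p)/p)
        (List.range' (p * p) ((n + 1 - p * p + p - 1) / p) p).foldl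
          (fun a i => a.set! i false) a
      else a) primes
  (List.range (n + 1)).filter (fun i => primes[i]!)

def sub_problem (target : Int) (n : Int) : Int :=
  let t := target.toNat   -- Pre_ gives 1 ≤ target, so toNat is exact
  let primes := prime_sieve t
  let ways := primes.foldl
    (fun w p => (List.range' p (t + 1 - p)).foldl
      (fun w i => w.set! i (w[i]! + w[i - p]!)) w)
    ((Array.replicate (t + 1) (0 : Int)).set! 0 1)
  match (List.range (t + 1)).find? (fun x => n ≤ ways[x]!) with
  | some x => (x : Int)
  | none => -1

-- ===== PORT B =====
-- count(k, r) with the dict memo threaded through, exactly as Source B computes it.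
-- The guard `1 ≤ p` (always true: primes are ≥ 2) only justifies termination.
def pvCountMemo (primes : List Nat) (k r : Nat) (memo : PySem.Dict (Nat × Nat) Int) :
    Int × PySem.Dict (Nat × Nat) Int :=
  if r = 0 then (1, memo)
  else
    match k with
    | 0 => (0, memo)
    | k' + 1 =>
      match memo.get? (k' + 1, r) with
      | some v => (v, memo)
      | none =>
        let res := pvCountMemo primes k' r memo
        let p := primes.getD k' 0
        let res2 :=
          if _h : 1 ≤ p ∧ p ≤ r then
            let resb := pvCountMemo primes (k' + 1) (r - p) res.2
            (res.1 + resb.1, resb.2)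
          else res
        (res2.1, res2.2.insert (k' + 1, r) res2.1)
  termination_by (k, r)
  decreasing_by
  all_goals first
    | exact Prod.Lex.left _ _ (Nat.lt_succ_self _)
    | exact Prod.Lex.right _ (by omega)

-- the x-scan of Source B: warm the memo over k, then test count(len(primes), x) >= n
def pvScanAlt (primes : List Nat) (n : Int) :
    List Nat → PySem.Dict (Nat × Nat) Int → Int
  | [], _ => -1
  | x :: xs, memo =>
    let memo := (List.range (primes.length + 1)).foldl
      (fun m k => (pvCountMemo primes k x m).2) memo
    let res := pvCountMemo primes primes.length x memo
    if n ≤ res.1 then (x : Int) else pvScanAlt primes n xs res.2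

def sub_problem_alt (target : Int) (n : Int) : Int :=
  let t := target.toNat
  let primes := prime_sieve t
  pvScanAlt primes n (List.range (t + 1)) PySem.Dict.empty

-- ===== PRECONDITION & SPEC =====
-- Pre_ excludes exactly target < 1, where A (and B, sharing prime_sieve) raises IndexError.
def Pre_sub_problem (target : Int) (n : Int) : Prop := 1 ≤ target
instance (target : Int) (n : Int) : Decidable (Pre_sub_problem target n) := by
  unfold Pre_sub_problem; infer_instance

def pvWitness_sub_problem : Int × Int := (7, 5)

def Spec_sub_problem (target : Int) (n : Int) (out : Int) : Prop := out = sub_problem_alt target n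
instance (target : Int) (n : Int) (out : Int) : Decidable (Spec_sub_problem target n out) := by unfold Spec_sub_problem; infer_instance

-- ===== CLAIM (what is proved, stated in full; the proofs are below) =====
def Claim_equal_sub_problem : Prop := ∀ (target : Int) (n : Int), Dom_sub_problem target n → Pre_sub_problem target n → Spec_sub_problem target n (sub_problem target n)

-- ===== LEMMAS AND PROOFS =====
-- the mathematical count both programs compute: partitions of r into primes drawn from primes[:k]
def pvCount (primes : List Nat) (k r : Nat) : Int :=
  if r = 0 then 1
  else
    match k with
    | 0 => 0
    | k' + 1 =>
      let p := primes.getD k' 0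
      if 1 ≤ p ∧ p ≤ r then pvCount primes k' r + pvCount primes (k' + 1) (r - p)
      else pvCount primes k' r
  termination_by (k, r)
  decreasing_by
  all_goals first
    | exact Prod.Lex.left _ _ (Nat.lt_succ_self _)
    | exact Prod.Lex.right _ (by omega)


-- pvCount unfoldings
theorem pvCount_r_zero (primes : List Nat) (k : Nat) : pvCount primes k 0 = 1 := by
  rw [pvCount.eq_def]; simp

theorem pvCount_zero (primes : List Nat) (r : Nat) :
    pvCount primes 0 r = if r = 0 then 1 else 0 := by
  by_cases hr : r = 0
  · subst hr; rw [pvCount_r_zero]; simp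
  · rw [pvCount.eq_def, if_neg hr]

theorem pvCount_succ (primes : List Nat) (k r : Nat) (hp : 1 ≤ primes.getD k 0) :
    pvCount primes (k + 1) r =
      pvCount primes k r +
        (if primes.getD k 0 ≤ r then pvCount primes (k + 1) (r - primes.getD k 0) else 0) := by
  by_cases hr : r = 0
  · subst hr
    rw [pvCount_r_zero, pvCount_r_zero, if_neg (by omega), add_zero]
  · conv_lhs => rw [pvCount.eq_def]
    rw [if_neg hr]
    show (if 1 ≤ primes.getD k 0 ∧ primes.getD k 0 ≤ r then
        pvCount primes k r + pvCount primes (k + 1) (r - primes.getD k 0)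
      else pvCount primes k r) = _
    by_cases hle : primes.getD k 0 ≤ r
    · rw [if_pos ⟨hp, hle⟩, if_pos hle]
    · rw [if_neg (fun hc => hle hc.2), if_neg hle, add_zero]

-- Array get!/set! facts used by the DP pass
theorem pv_get_set_ne (a : Array Int) (i j : Nat) (v : Int) (h : i ≠ j) :
    (a.setIfInBounds i v)[j]! = a[j]! := by
  by_cases hj : j < a.size
  · rw [Array.getElem!_eq_getD, Array.getElem!_eq_getD]
    simp [Array.getD, h, hj]
  · rw [Array.getElem!_eq_getD, Array.getElem!_eq_getD]
    simp [Array.getD, hj]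
theorem pv_get_set_self (a : Array Int) (i : Nat) (v : Int) (hi : i < a.size) :
    (a.setIfInBounds i v)[i]! = v := by
  rw [Array.getElem!_eq_getD]
  simp [Array.getD, hi]

-- one DP pass for a single prime p: positions < j already updated, positions ≥ j untouched
theorem pv_pass_aux (t k : Nat) (primes : List Nat) (hp1 : 1 ≤ primes.getD k 0) :
    ∀ (m j : Nat) (w : Array Int), primes.getD k 0 ≤ j → j + m = t + 1 → w.size = t + 1 →
    (∀ x, x < j → w[x]! = pvCount primes (k + 1) x) →
    (∀ x, j ≤ x → x < t + 1 → w[x]! = pvCount primes k x) →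
    ((List.range' j m).foldl (fun w i => w.set! i (w[i]! + w[i - primes.getD k 0]!)) w).size = t + 1 ∧
    ∀ x, x < t + 1 →
      ((List.range' j m).foldl (fun w i => w.set! i (w[i]! + w[i - primes.getD k 0]!)) w)[x]! =
        pvCount primes (k + 1) x := by
  intro m
  induction m with
  | zero =>
    intro j w hpj hjm hsz hlt hge
    simp only [List.range', List.foldl_nil]
    exact ⟨hsz, fun x hx => hlt x (by omega)⟩
  | succ m ih =>
    intro j w hpj hjm hsz hlt hge
    have hjlt : j < t + 1 := by omega
    rw [List.range'_succ, List.foldl_cons]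
    set p := primes.getD k 0 with hpdef
    have hw1sz : (w.set! j (w[j]! + w[j - p]!)).size = t + 1 := by
      simpa [Array.set!] using hsz
    apply ih (j + 1) _ (by omega) (by omega) hw1sz
    · intro x hx
      by_cases hxj : x = j
      · subst hxj
        rw [Array.set!, pv_get_set_self _ _ _ (by omega)]
        have h1 : w[x]! = pvCount primes k x := hge x (by omega) hjlt
        have h2 : w[x - p]! = pvCount primes (k + 1) (x - p) := hlt (x - p) (by omega)
        rw [h1, h2, pvCount_succ primes k x hp1, if_pos (by omega)]
      · rw [Array.set!, pv_get_set_ne _ _ _ _ (by omega)]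
        exact hlt x (by omega)
    · intro x hx1 hx2
      rw [Array.set!, pv_get_set_ne _ _ _ _ (by omega)]
      exact hge x (by omega) hx2

theorem pv_pass (t k : Nat) (primes : List Nat) (hp1 : 1 ≤ primes.getD k 0)
    (w : Array Int) (hsz : w.size = t + 1)
    (hw : ∀ x, x < t + 1 → w[x]! = pvCount primes k x) :
    ((List.range' (primes.getD k 0) (t + 1 - primes.getD k 0)).foldl
        (fun w i => w.set! i (w[i]! + w[i - primes.getD k 0]!)) w).size = t + 1 ∧
    ∀ x, x < t + 1 →
      ((List.range' (primes.getD k 0) (t + 1 - primes.getD k 0)).foldl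
          (fun w i => w.set! i (w[i]! + w[i - primes.getD k 0]!)) w)[x]! =
        pvCount primes (k + 1) x := by
  by_cases hpt : primes.getD k 0 ≤ t + 1
  · refine pv_pass_aux t k primes hp1 (t + 1 - primes.getD k 0) (primes.getD k 0) w
      (le_refl _) (by omega) hsz (fun x hx => ?_) (fun x _ hx2 => hw x hx2)
    rw [hw x (by omega), pvCount_succ primes k x hp1, if_neg (by omega), add_zero]
  · have h0 : t + 1 - primes.getD k 0 = 0 := by omega
    rw [h0]
    simp only [List.range', List.foldl_nil]
    refine ⟨hsz, fun x hx => ?_⟩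
    rw [hw x hx, pvCount_succ primes k x hp1, if_neg (by omega), add_zero]

-- the whole DP fold over the primes list
theorem pv_dp_fold (t : Nat) (primes : List Nat) (hpos : ∀ p ∈ primes, 1 ≤ p) :
    ∀ (ps : List Nat) (k : Nat) (w : Array Int), ps = primes.drop k →
    w.size = t + 1 → (∀ x, x < t + 1 → w[x]! = pvCount primes k x) →
    (ps.foldl (fun w p => (List.range' p (t + 1 - p)).foldl
        (fun w i => w.set! i (w[i]! + w[i - p]!)) w) w).size = t + 1 ∧
    ∀ x, x < t + 1 →
      (ps.foldl (fun w p => (List.range' p (t + 1 - p)).foldl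
          (fun w i => w.set! i (w[i]! + w[i - p]!)) w) w)[x]! =
        pvCount primes (k + ps.length) x := by
  intro ps
  induction ps with
  | nil =>
    intro k w _ hsz hw
    simp only [List.foldl_nil, List.length_nil, Nat.add_zero]
    exact ⟨hsz, hw⟩
  | cons p ps' ih =>
    intro k w hdrop hsz hw
    have hkget : primes[k]? = some p := by
      have h1 : (List.drop k primes)[0]? = some p := by rw [← hdrop]; rfl
      rwa [List.getElem?_drop, Nat.add_zero] at h1
    have hgetD : primes.getD k 0 = p := by
      simp [List.getD, hkget]
    have hmem : p ∈ primes := List.mem_of_getElem? hkget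
    have hp1 : 1 ≤ primes.getD k 0 := by rw [hgetD]; exact hpos p hmem
    have hdrop' : ps' = primes.drop (k + 1) := by
      have h2 : List.drop (k + 1) primes = List.drop 1 (List.drop k primes) := by
        rw [List.drop_drop, Nat.add_comm]
      rw [h2, ← hdrop]
      rfl
    rw [List.foldl_cons]
    have hpass := pv_pass t k primes hp1 w hsz hw
    rw [hgetD] at hpass
    have hrest := ih (k + 1) _ hdrop' hpass.1 hpass.2
    refine ⟨hrest.1, fun x hx => ?_⟩
    have harith : k + (p :: ps').length = k + 1 + ps'.length := by
      rw [List.length_cons]; omega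
    rw [harith]
    exact hrest.2 x hx

-- the initial array [1] + [0]*t matches pvCount primes 0
theorem pv_init (t : Nat) (primes : List Nat) :
    ((Array.replicate (t + 1) (0 : Int)).set! 0 1).size = t + 1 ∧
    ∀ x, x < t + 1 → ((Array.replicate (t + 1) (0 : Int)).set! 0 1)[x]! = pvCount primes 0 x := by
  constructor
  · simp [Array.set!]
  · intro x hx
    rw [pvCount_zero]
    by_cases hx0 : x = 0
    · subst hx0
      rw [Array.set!, pv_get_set_self _ _ _ (by simp)]
      simp
    · rw [Array.set!, pv_get_set_ne _ _ _ _ (Ne.symm hx0), if_neg hx0]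
      rw [Array.getElem!_eq_getD]
      simp [Array.getD, hx]

-- sieve facts: the fold only turns entries false, so 0 and 1 stay unmarked: members are at least 2
theorem pv_foldl_mono_true {A : Type} (f : Array Bool → A → Array Bool)
    (hf : ∀ (a : Array Bool) (x : A) (i : Nat), (f a x)[i]! = true → a[i]! = true) :
    ∀ (l : List A) (a : Array Bool) (i : Nat), (l.foldl f a)[i]! = true → a[i]! = true := by
  intro l
  induction l with
  | nil => intro a i h; exact h
  | cons x xs ih => intro a i h; exact hf a x i (ih (f a x) i h)

theorem pv_set_false_mono (a : Array Bool) (j i : Nat) :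
    (a.setIfInBounds j false)[i]! = true → a[i]! = true := by
  intro h
  by_cases hij : i = j
  · subst hij
    by_cases hi : i < a.size
    · rw [Array.getElem!_eq_getD] at h
      simp [Array.getD, hi] at h
    · rw [Array.getElem!_eq_getD] at h ⊢
      simpa [Array.getD, hi] using h
  · by_cases hi : i < a.size
    · rw [Array.getElem!_eq_getD] at h ⊢
      simpa [Array.getD, hi, Ne.symm hij] using h
    · rw [Array.getElem!_eq_getD] at h ⊢
      simpa [Array.getD, hi] using h

theorem pv_sieve_pos (t : Nat) : ∀ p ∈ prime_sieve t, 2 ≤ p := by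
  intro p hp
  unfold prime_sieve at hp
  simp only [List.mem_filter, List.mem_range] at hp
  obtain ⟨hplt, htrue⟩ := hp
  have h0 : (((Array.replicate (t + 1) true).set! 0 false).set! 1 false)[p]! = true := by
    refine pv_foldl_mono_true _ ?_ _ _ _ htrue
    intro a q i h
    split at h
    · refine pv_foldl_mono_true _ ?_ _ _ _ h
      intro a x i h
      exact pv_set_false_mono a x i (by simpa [Array.set!] using h)
    · exact h
  by_contra hlt
  interval_cases p
  · rw [Array.set!, Array.set!] at h0
    have h1 := pv_set_false_mono _ 1 0 h0
    rw [Array.getElem!_eq_getD] at h1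
    simp [Array.getD, Array.setIfInBounds] at h1
  · rw [Array.set!, Array.set!] at h0
    rw [Array.getElem!_eq_getD] at h0
    simp [Array.getD] at h0

-- find? only looks at its predicate on members (no such lemma in the libraries at hand)
theorem pv_find?_congr {A : Type} (l : List A) (p q : A → Bool)
    (h : ∀ a ∈ l, p a = q a) : l.find? p = l.find? q := by
  induction l with
  | nil => rfl
  | cons x xs ih =>
    rw [List.find?_cons, List.find?_cons, h x List.mem_cons_self]
    cases q x
    · exact ih fun a ha => h a (List.mem_cons_of_mem _ ha)
    · rfl

-- one-step unfolding of pvCount at a successor level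
theorem pvCount_succ_def (primes : List Nat) (k' r : Nat) (hr : r ≠ 0) :
    pvCount primes (k' + 1) r =
      if 1 ≤ primes.getD k' 0 ∧ primes.getD k' 0 ≤ r then
        pvCount primes k' r + pvCount primes (k' + 1) (r - primes.getD k' 0)
      else pvCount primes k' r := by
  conv_lhs => rw [pvCount.eq_def]
  rw [if_neg hr]

-- B's memoized count is sound: it returns pvCount and keeps every memo entry equal to pvCount
def pvSound (primes : List Nat) (memo : PySem.Dict (Nat × Nat) Int) : Prop :=
  ∀ k r v, memo.get? (k, r) = some v → v = pvCount primes k r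

theorem pv_countMemo_sound (primes : List Nat) (k r : Nat) (memo : PySem.Dict (Nat × Nat) Int) :
    pvSound primes memo →
    (pvCountMemo primes k r memo).1 = pvCount primes k r ∧
    pvSound primes (pvCountMemo primes k r memo).2 := by
  fun_induction pvCountMemo primes k r memo with
  | case1 k memo =>
    intro hs
    rw [pvCount_r_zero]
    exact ⟨rfl, hs⟩
  | case2 r memo hr =>
    intro hs
    refine ⟨?_, hs⟩
    rw [pvCount.eq_def, if_neg hr]
  | case3 r memo hr k' v hv =>
    intro hs
    refine ⟨?_, hs⟩
    have hval := hs (k' + 1) r v hv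
    simpa [Nat.succ_eq_add_one] using hval
  | case4 r memo hr k' hv res p res2 ih1 ih2 =>
    intro hs
    obtain ⟨ha, hsa⟩ := ih1 hs
    simp only [res2, res, p] at ih2 ⊢
    simp only [Nat.succ_eq_add_one]
    by_cases hg : 1 ≤ primes.getD k' 0 ∧ primes.getD k' 0 ≤ r
    · obtain ⟨hb, hsb⟩ := ih2 hg hsa
      rw [dif_pos hg]
      have hval : (pvCountMemo primes k' r memo).1 +
          (pvCountMemo primes (k' + 1) (r - primes.getD k' 0) (pvCountMemo primes k' r memo).2).1 =
          pvCount primes (k' + 1) r := by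
        rw [ha, hb, pvCount_succ_def primes k' r hr, if_pos hg]
      refine ⟨hval, ?_⟩
      intro k2 r2 v2 hv2
      rw [PySem.Dict.get?_insert] at hv2
      by_cases hk : (k2, r2) = (k' + 1, r)
      · rw [if_pos hk] at hv2
        have hk' := hk
        simp only [Prod.mk.injEq] at hk'
        obtain ⟨h1, h2⟩ := hk'
        subst h1; subst h2
        rw [← Option.some_inj.mp hv2]
        exact hval
      · rw [if_neg hk] at hv2
        exact hsb _ _ _ hv2
    · rw [dif_neg hg]
      have hval : (pvCountMemo primes k' r memo).1 = pvCount primes (k' + 1) r := by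
        rw [ha, pvCount_succ_def primes k' r hr, if_neg hg]
      refine ⟨hval, ?_⟩
      intro k2 r2 v2 hv2
      rw [PySem.Dict.get?_insert] at hv2
      by_cases hk : (k2, r2) = (k' + 1, r)
      · rw [if_pos hk] at hv2
        have hk' := hk
        simp only [Prod.mk.injEq] at hk'
        obtain ⟨h1, h2⟩ := hk'
        subst h1; subst h2
        rw [← Option.some_inj.mp hv2]
        exact hval
      · rw [if_neg hk] at hv2
        exact hsa _ _ _ hv2

theorem pv_warm_sound (primes : List Nat) (x : Nat) :
    ∀ (l : List Nat) (memo : PySem.Dict (Nat × Nat) Int), pvSound primes memo →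
    pvSound primes (l.foldl (fun m k => (pvCountMemo primes k x m).2) memo) := by
  intro l
  induction l with
  | nil => intro memo hs; exact hs
  | cons k ks ih =>
    intro memo hs
    exact ih _ (pv_countMemo_sound primes k x memo hs).2

-- B's scan equals the pure find? over pvCount
theorem pv_scan_eq (primes : List Nat) (n : Int) :
    ∀ (xs : List Nat) (memo : PySem.Dict (Nat × Nat) Int), pvSound primes memo →
    pvScanAlt primes n xs memo =
      match xs.find? (fun x => n ≤ pvCount primes primes.length x) with
      | some x => (x : Int)
      | none => -1 := by
  intro xs
  induction xs with
  | nil => intro memo _; rfl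
  | cons x xs ih =>
    intro memo hs
    have hwarm := pv_warm_sound primes x (List.range (primes.length + 1)) memo hs
    have hres := pv_countMemo_sound primes primes.length x _ hwarm
    rw [pvScanAlt, List.find?_cons]
    by_cases hc : n ≤ pvCount primes primes.length x
    · rw [hres.1, if_pos hc]
      simp [hc]
    · rw [hres.1, if_neg hc]
      simp only [hc, decide_false]
      exact ih _ hres.2

-- ===== VERDICT (by name: the statement is the Claim_ definition above) =====
theorem sub_problem_spec : Claim_equal_sub_problem := by
  intro target n _ _
  unfold Spec_sub_problem sub_problem sub_problem_alt
  have hpos : ∀ p ∈ prime_sieve target.toNat, 1 ≤ p := fun p hp => by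
    have := pv_sieve_pos target.toNat p hp; omega
  have hinit := pv_init target.toNat (prime_sieve target.toNat)
  have hdp := pv_dp_fold target.toNat (prime_sieve target.toNat) hpos
    (prime_sieve target.toNat) 0 _ (by rw [List.drop_zero]) hinit.1 hinit.2
  have hempty : pvSound (prime_sieve target.toNat) PySem.Dict.empty := by
    intro k r v hv
    rw [PySem.Dict.get?_empty] at hv
    simp at hv
  show (match (List.range (target.toNat + 1)).find? (fun x => decide (n ≤
      ((prime_sieve target.toNat).foldl
        (fun w p => (List.range' p (target.toNat + 1 - p)).foldl
          (fun w i => w.set! i (w[i]! + w[i - p]!)) w)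
        ((Array.replicate (target.toNat + 1) (0 : Int)).set! 0 1))[x]!)) with
    | some x => (x : Int)
    | none => -1) =
    pvScanAlt (prime_sieve target.toNat) n (List.range (target.toNat + 1)) PySem.Dict.empty
  rw [pv_scan_eq (prime_sieve target.toNat) n (List.range (target.toNat + 1)) PySem.Dict.empty hempty]
  have hcong := pv_find?_congr (List.range (target.toNat + 1))
    (fun x => decide (n ≤
      ((prime_sieve target.toNat).foldl
        (fun w p => (List.range' p (target.toNat + 1 - p)).foldl
          (fun w i => w.set! i (w[i]! + w[i - p]!)) w)
        ((Array.replicate (target.toNat + 1) (0 : Int)).set! 0 1))[x]!))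
    (fun x => decide (n ≤ pvCount (prime_sieve target.toNat) (prime_sieve target.toNat).length x))
    (fun x hx => by
      rw [List.mem_range] at hx
      have h2 := hdp.2 x hx
      rw [Nat.zero_add] at h2
      exact congrArg (fun c : Int => decide (n ≤ c)) h2)
  rw [hcong]
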